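-- pv_equiv track=rewrite | github.com/sanslayr/polymarket-weatherbot | scripts/market_alert_scheduler.py | _normalize_minute_slots
-- ===== SOURCE A (Python) =====
-- from typing import Any
--
-- def _normalize_minute_slots(slots: list[Any] | None) -> list[int]:
--     normalized: list[int] = []
--     for item in slots or []:
--         try:
--             minute = int(item)
--         except Exception:
--             continue
--         if 0 <= minute < 60:
--             normalized.append(minute)
--     return sorted(dict.fromkeys(normalized))
-- ===== SOURCE B (Python) =====
-- def _normalize_minute_slots(slots):
--     # Online insertion: keep `result` sorted and duplicate-free at all times by
--     # inserting each valid minute at its position; no sorted() and no dict needed.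
--     result = []
--     for item in slots or []:
--         try:
--             minute = int(item)
--         except Exception:
--             continue
--         if not (0 <= minute < 60):
--             continue
--         lo = 0
--         while lo < len(result) and result[lo] < minute:
--             lo += 1
--         if lo == len(result) or result[lo] != minute:
--             result.insert(lo, minute)
--     return result
-- ===== Notes on version B (the rewrite author's own statement) =====
-- stated objective: alternative
-- what changed: B is an online insertion algorithm: the result list is kept sorted and duplicate-free as an invariant, each valid minute being inserted at its ordered position (or skipped if present), instead of A's staged append-all / dict.fromkeys dedup / final sorted() pipeline.
import Mathlib
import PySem

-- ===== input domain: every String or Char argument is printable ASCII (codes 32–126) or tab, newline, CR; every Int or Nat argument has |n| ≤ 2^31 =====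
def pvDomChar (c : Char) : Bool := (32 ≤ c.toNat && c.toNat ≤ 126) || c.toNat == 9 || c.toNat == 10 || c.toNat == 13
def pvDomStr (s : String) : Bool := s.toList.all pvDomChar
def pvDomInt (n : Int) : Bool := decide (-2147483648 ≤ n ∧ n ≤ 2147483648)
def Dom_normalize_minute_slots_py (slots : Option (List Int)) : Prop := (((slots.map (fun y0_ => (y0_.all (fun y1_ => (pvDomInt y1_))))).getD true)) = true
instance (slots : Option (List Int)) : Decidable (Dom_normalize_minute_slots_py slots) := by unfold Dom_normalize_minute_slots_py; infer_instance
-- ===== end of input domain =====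

-- B replaces A's append-all / dict.fromkeys / sorted() pipeline by an online insertion
-- algorithm that keeps the result sorted and duplicate-free as a loop invariant (alternative).


-- ===== PORT A =====
-- literal port: build `normalized` by appending in-range minutes, then sorted(dict.fromkeys(normalized))
def normalize_minute_slots_py (slots : Option (List Int)) : List Int :=
  let normalized : List Int :=
    (slots.getD []).foldl (fun acc item =>
      if 0 ≤ item ∧ item < 60 then acc ++ [item] else acc) []
  PySem.List.sorted (PySem.List.dedup normalized) (fun x => x) false

-- ===== PORT B =====
-- Source B's inner insertion loop: scan past elements < minute, then insert unless already present
def pyInsertSorted (res : List Int) (minute : Int) : List Int :=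
  match res with
  | [] => [minute]
  | x :: xs =>
    if x < minute then x :: pyInsertSorted xs minute
    else if x = minute then x :: xs
    else minute :: x :: xs

-- literal port of Source B: one pass, inserting each valid minute into the sorted, duplicate-free result
def normalize_minute_slots_py_alt (slots : Option (List Int)) : List Int :=
  (slots.getD []).foldl (fun result item =>
    if ¬ (0 ≤ item ∧ item < 60) then result else pyInsertSorted result item) []

-- ===== PRECONDITION & SPEC =====
def Spec_normalize_minute_slots_py (slots : Option (List Int)) (out : List Int) : Prop := out = normalize_minute_slots_py_alt slots
instance (slots : Option (List Int)) (out : List Int) : Decidable (Spec_normalize_minute_slots_py slots out) := by unfold Spec_normalize_minute_slots_py; infer_instance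

-- ===== CLAIM =====
def Claim_equal_normalize_minute_slots_py : Prop := ∀ (slots : Option (List Int)), Dom_normalize_minute_slots_py slots → Spec_normalize_minute_slots_py slots (normalize_minute_slots_py slots)

-- ===== LEMMAS AND PROOFS =====

theorem mem_pyInsertSorted (res : List Int) (m y : Int) :
    y ∈ pyInsertSorted res m ↔ y = m ∨ y ∈ res := by
  induction res with
  | nil => simp [pyInsertSorted]
  | cons x xs ih =>
    simp only [pyInsertSorted]
    split_ifs with h1 h2
    · simp only [List.mem_cons, ih]; tauto
    · subst h2; simp only [List.mem_cons]; tauto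
    · simp only [List.mem_cons]

theorem pairwise_pyInsertSorted (res : List Int) (m : Int)
    (h : res.Pairwise (· < ·)) : (pyInsertSorted res m).Pairwise (· < ·) := by
  induction res with
  | nil => simp [pyInsertSorted]
  | cons x xs ih =>
    rw [List.pairwise_cons] at h
    simp only [pyInsertSorted]
    split_ifs with h1 h2
    · refine List.pairwise_cons.mpr ⟨?_, ih h.2⟩
      intro y hy
      rcases (mem_pyInsertSorted xs m y).mp hy with rfl | hy'
      · exact h1
      · exact h.1 y hy'
    · exact List.pairwise_cons.mpr h
    · refine List.pairwise_cons.mpr ⟨?_, List.pairwise_cons.mpr h⟩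
      intro y hy
      rcases List.mem_cons.mp hy with rfl | hy'
      · omega
      · exact lt_trans (by omega) (h.1 y hy')

-- fold of pyInsertSorted over any list preserves strict sortedness and collects members
theorem foldl_pyInsertSorted_pairwise (F : List Int) :
    ∀ acc : List Int, acc.Pairwise (· < ·) → (F.foldl pyInsertSorted acc).Pairwise (· < ·) := by
  induction F with
  | nil => intro acc h; simpa using h
  | cons x xs ih =>
    intro acc h
    exact ih _ (pairwise_pyInsertSorted acc x h)

theorem mem_foldl_pyInsertSorted (F : List Int) :
    ∀ (acc : List Int) (y : Int), y ∈ F.foldl pyInsertSorted acc ↔ y ∈ acc ∨ y ∈ F := by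
  induction F with
  | nil => intro acc y; simp
  | cons x xs ih =>
    intro acc y
    simp only [List.foldl_cons, ih, mem_pyInsertSorted, List.mem_cons]
    tauto

-- ===== VERDICT =====
theorem normalize_minute_slots_py_spec : Claim_equal_normalize_minute_slots_py := by
  intro slots _
  unfold Spec_normalize_minute_slots_py normalize_minute_slots_py normalize_minute_slots_py_alt
  have hguard : ∀ (result : List Int) (item : Int),
      (if ¬ (0 ≤ item ∧ item < 60) then result else pyInsertSorted result item)
        = (if 0 ≤ item ∧ item < 60 then pyInsertSorted result item else result) := by
    intro result item; split_ifs <;> tauto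
  simp only [hguard]
  rw [PySem.List.foldl_ite_eq_foldl_filter, PySem.List.foldl_ite_eq_foldl_filter,
    PySem.List.foldl_append_singleton_eq_self, List.nil_append]
  set F := (slots.getD []).filter (fun item => decide (0 ≤ item ∧ item < 60)) with hF
  have hpw : (F.foldl pyInsertSorted []).Pairwise (· < ·) :=
    foldl_pyInsertSorted_pairwise F [] (by simp)
  apply PySem.List.sorted_eq_of_perm_of_pairwise_lt
  · apply (List.perm_ext_iff_of_nodup ?_ ?_).mpr
    · intro y
      rw [mem_foldl_pyInsertSorted, PySem.List.mem_dedup]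
      simp
    · exact hpw.imp ne_of_lt
    · exact PySem.List.nodup_dedup F
  · exact hpw
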